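-- pv_equiv track=rewrite | github.com/LakeClub/lakedrive | src/lakedrive/utils/helpers.py | path_filter_overlap
-- ===== SOURCE A (Python) =====
-- from typing import List, Iterator, AsyncIterator, Any
--
-- def path_filter_overlap(paths: List[str]) -> List[str]:
--     """Filter out overlapping paths from a list of paths"""
--     # sort based on "/" length -- strip off "/" at end
--     paths_sorted = sorted(
--         [p.rstrip("/") if p[-1] == "/" else p for p in paths],
--         key=lambda p: p.count("/"),
--     )
--     paths_filtered = []
--
--     for p in paths_sorted:
--         if p in paths_filtered:
--             continue
--         gp = p.rsplit("/", 1)[0]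
--         if gp in paths_filtered:
--             continue
--         paths_filtered.append(p)
--     return paths_filtered
-- ===== SOURCE B (Python) =====
-- from typing import List
--
--
-- def path_filter_overlap(paths: List[str]) -> List[str]:
--     """Filter out overlapping paths from a list of paths"""
--     # normalize and stable-sort by depth, dedup keeping first occurrences
--     ordered = sorted((p.rstrip("/") for p in paths), key=lambda p: p.count("/"))
--     uniq = list(dict.fromkeys(ordered))
--     present = set(uniq)
--
--     # keep(p): climb the parent chain; p survives iff its parent does not
--     def keep(p: str) -> bool:
--         if "/" not in p:
--             return True
--         parent = p.rsplit("/", 1)[0]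
--         if parent not in present:
--             return True
--         return not keep(parent)
--
--     return [p for p in uniq if keep(p)]
-- ===== Notes on version B (the rewrite author's own statement) =====
-- stated objective: faster
-- what changed: Replaces A's incremental accumulate-and-list-membership scan with a precomputed set of the unique depth-sorted paths plus a recursive parent-chain walk (keep(p) = parent absent or not keep(parent)).
import Mathlib
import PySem

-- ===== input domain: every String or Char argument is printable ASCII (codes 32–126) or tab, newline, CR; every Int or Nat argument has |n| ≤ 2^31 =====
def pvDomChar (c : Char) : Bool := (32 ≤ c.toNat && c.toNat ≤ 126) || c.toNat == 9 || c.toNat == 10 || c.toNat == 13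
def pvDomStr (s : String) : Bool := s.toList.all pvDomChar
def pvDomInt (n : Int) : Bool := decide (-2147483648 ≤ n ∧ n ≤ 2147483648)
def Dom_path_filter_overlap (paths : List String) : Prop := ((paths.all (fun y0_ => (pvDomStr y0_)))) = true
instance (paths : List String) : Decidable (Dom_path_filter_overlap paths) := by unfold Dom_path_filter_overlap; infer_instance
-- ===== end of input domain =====

-- B replaces A's quadratic accumulate-and-membership scan by a precomputed uniqueness table plus
-- a recursive parent-chain walk; same return value on every input where A returns (A raises
-- IndexError when some path is the empty string — excluded by Pre_).

-- ===== PORT A =====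
-- p.rstrip("/") (PySem has no char-set right-strip: drop trailing '/' on the reversed list — exact)
def pvRstripSlash (p : String) : String :=
  String.ofList ((p.toList.reverse.dropWhile (fun c => c == '/')).reverse)

-- p.rsplit("/", 1)[0] — everything before the LAST '/', the whole string when no '/' (exact)
def pvParentChars (cs : List Char) : List Char :=
  ((cs.reverse.dropWhile (fun c => c != '/')).tail).reverse

def pvParent (p : String) : String :=
  if p.toList.contains '/' then String.ofList (pvParentChars p.toList) else p

-- p.count("/")
def pvKey (p : String) : Nat := PySem.Str.count p "/"

def path_filter_overlap (paths : List String) : List String :=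
  let paths_sorted :=
    PySem.List.sorted
      (paths.map (fun p => if PySem.Str.pyGet? p (-1) = some '/' then pvRstripSlash p else p))
      (fun p => pvKey p)
  paths_sorted.foldl
    (fun acc p =>
      if acc.contains p then acc
      else if acc.contains (pvParent p) then acc
      else acc ++ [p]) []

-- ===== PORT B =====
-- Source B's keep(p): climb the parent chain; the recursion is bounded by cs.length
-- (the parent is strictly shorter), so the port carries that bound as structural fuel — exact.
def pvKeep (S : PySem.Set String) : Nat → List Char → Bool
  | 0, _ => true
  | fuel + 1, cs =>
    if cs.contains '/' then
      if PySem.Set.contains S (String.ofList (pvParentChars cs)) then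
        ! pvKeep S fuel (pvParentChars cs)
      else true
    else true

def path_filter_overlap_alt (paths : List String) : List String :=
  let ordered := PySem.List.sorted (paths.map (fun p => pvRstripSlash p)) (fun p => pvKey p)
  let uniq := PySem.List.dedup ordered
  let present := PySem.Set.ofList uniq
  uniq.filter (fun p => pvKeep present p.toList.length p.toList)

-- ===== PRECONDITION & SPEC =====
-- A evaluates p[-1] on every path: it raises IndexError iff some path is the empty string.
def Pre_path_filter_overlap (paths : List String) : Prop := "" ∉ paths
instance (paths : List String) : Decidable (Pre_path_filter_overlap paths) := by
  unfold Pre_path_filter_overlap; infer_instance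

def pvWitness_path_filter_overlap : List String := ["a/b", "a", "c/"]

def Spec_path_filter_overlap (paths : List String) (out : List String) : Prop :=
  out = path_filter_overlap_alt paths
instance (paths : List String) (out : List String) : Decidable (Spec_path_filter_overlap paths out) := by
  unfold Spec_path_filter_overlap; infer_instance

-- ===== CLAIM (what is proved, stated in full; the proofs are below) =====
def Claim_equal_path_filter_overlap : Prop :=
  ∀ (paths : List String), Dom_path_filter_overlap paths → Pre_path_filter_overlap paths →
    Spec_path_filter_overlap paths (path_filter_overlap paths)

-- ===== LEMMAS AND PROOFS =====

-- xs[-1] is the head of the reversed list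
theorem pvPyGet_neg_one {α : Type} (l : List α) : PySem.List.pyGet? l (-1) = l.reverse.head? := by
  unfold PySem.List.pyGet? PySem.List.pyIdx?
  rcases l.eq_nil_or_concat with rfl | ⟨t, a, rfl⟩
  · simp
  · rw [if_neg (by omega : ¬ (0:Int) ≤ -1), if_pos (by simp : -((t.concat a).length : Int) ≤ -1)]
    simp

-- A's conditional normalization is rstrip("/") on every string
theorem pvNorm_eq (p : String) :
    (if PySem.Str.pyGet? p (-1) = some '/' then pvRstripSlash p else p) = pvRstripSlash p := by
  have h : PySem.Str.pyGet? p (-1) = p.toList.reverse.head? := by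
    simp only [PySem.Str.pyGet?_eq, PySem.Chars.pyGet?_eq_listPyGet?]
    exact pvPyGet_neg_one _
  rcases hr : p.toList.reverse with _ | ⟨c, t⟩
  · have hp : p.toList = [] := by simpa using congrArg List.reverse hr
    have : p = "" := by
      have := congrArg String.ofList hp; simpa using this
    subst this
    simp [pvRstripSlash]
  · by_cases hc : c = '/'
    · subst hc; rw [if_pos (by rw [h, hr]; rfl)]
    · rw [if_neg (by rw [h, hr]; simp [hc])]
      unfold pvRstripSlash
      rw [hr, List.dropWhile_cons_of_neg (by simp [hc])]
      rw [← hr]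
      simp

theorem pvCount_go_single (fuel : Nat) : ∀ (l : List Char) (acc : Nat), l.length ≤ fuel →
    PySem.Chars.count.go ['/'] fuel l acc = acc + l.count '/' := by
  induction fuel with
  | zero => intro l acc h
            have : l = [] := List.length_eq_zero_iff.mp (Nat.le_zero.mp h)
            subst this; rw [PySem.Chars.count.go]; simp
  | succ n ih =>
    intro l acc h
    cases l with
    | nil => rw [PySem.Chars.count.go]; simp; omega
    | cons c t =>
      rw [PySem.Chars.count.go]
      by_cases hc : c = '/'
      · subst hc
        have hp : List.isPrefixOf ['/'] ('/' :: t) = true := by simp [List.isPrefixOf]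
        rw [if_pos hp]
        simp only [List.length_singleton, List.drop_one, List.tail_cons]
        rw [ih t acc.succ (by simpa using Nat.lt_succ_iff.mp (by simpa using h))]
        simp
        omega
      · have hp : List.isPrefixOf ['/'] (c :: t) = false := by
          simp [List.isPrefixOf]; exact fun hh => (hc hh.symm).elim
        rw [if_neg (by simp [hp])]
        rw [ih t acc (by simpa using Nat.lt_succ_iff.mp (by simpa using h))]
        simp [hc]

-- pvKey counts '/' characters
theorem pvKey_eq_count (p : String) : pvKey p = p.toList.count '/' := by
  unfold pvKey
  rw [PySem.Str.count_eq]
  unfold PySem.Chars.count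
  rw [if_neg (by simp)]
  rw [show ("/" : String).toList = ['/'] from rfl]
  rw [pvCount_go_single _ p.toList 0 (by simp)]
  simp

theorem pvKey_ofList (l : List Char) : pvKey (String.ofList l) = l.count '/' := by
  rw [pvKey_eq_count]; simp

-- decomposition at the last '/'
theorem pvParentChars_decomp (cs : List Char) (h : cs.contains '/' = true) :
    ∃ seg : List Char, cs = pvParentChars cs ++ '/' :: seg ∧ seg.contains '/' = false := by
  set q : Char → Bool := fun c => c != '/' with hq
  have hmem : '/' ∈ cs.reverse := by
    simp only [List.contains_eq_mem, decide_eq_true_eq] at h; simpa using h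
  have hne : cs.reverse.dropWhile q ≠ [] := by
    intro hnil
    have := List.dropWhile_eq_nil_iff.mp hnil '/' hmem
    simp [hq] at this
  obtain ⟨d, ds, hd⟩ := List.exists_cons_of_ne_nil hne
  have hdslash : d = '/' := by
    have h1 := List.head_dropWhile_not q (l := cs.reverse) hne
    have h2 : (cs.reverse.dropWhile q).head hne = d := by simp [hd]
    rw [h2] at h1
    simpa [hq] using h1
  subst hdslash
  refine ⟨(cs.reverse.takeWhile q).reverse, ?_, ?_⟩
  · have hsplit : cs.reverse.takeWhile q ++ cs.reverse.dropWhile q = cs.reverse :=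
      List.takeWhile_append_dropWhile
    have hpc : pvParentChars cs = ds.reverse := by
      unfold pvParentChars; rw [← hq, hd]; simp
    have hrev : cs.reverse = cs.reverse.takeWhile q ++ ('/' :: ds) := by rw [← hd, hsplit]
    rw [hpc]
    conv_lhs => rw [← cs.reverse_reverse, hrev]
    simp
  · simp only [List.contains_eq_mem, decide_eq_false_iff_not]
    intro hmem2
    have hmem3 : '/' ∈ cs.reverse.takeWhile q := by simpa using hmem2
    have := List.mem_takeWhile_imp hmem3
    simp [hq] at this

theorem pvParentChars_length_lt (cs : List Char) (h : cs.contains '/' = true) :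
    (pvParentChars cs).length < cs.length := by
  obtain ⟨seg, hdec, -⟩ := pvParentChars_decomp cs h
  conv_rhs => rw [hdec]
  simp

theorem pvParent_key_lt (cs : List Char) (h : cs.contains '/' = true) :
    (pvParentChars cs).count '/' < cs.count '/' := by
  obtain ⟨seg, hdec, hseg⟩ := pvParentChars_decomp cs h
  have hseg0 : seg.count '/' = 0 := by
    simp only [List.contains_eq_mem, decide_eq_false_iff_not] at hseg
    simpa using List.count_eq_zero.mpr hseg
  conv_rhs => rw [hdec]
  simp [List.count_append, hseg0]

-- pvKeep ignores the fuel once it covers the length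
theorem pvKeep_fuel (S : PySem.Set String) : ∀ (f₁ : Nat), ∀ (f₂ : Nat) (cs : List Char),
    cs.length ≤ f₁ → cs.length ≤ f₂ → pvKeep S f₁ cs = pvKeep S f₂ cs := by
  intro f₁
  induction f₁ with
  | zero =>
    intro f₂ cs h1 h2
    have : cs = [] := List.length_eq_zero_iff.mp (Nat.le_zero.mp h1)
    subst this
    cases f₂ <;> simp [pvKeep]
  | succ n ih =>
    intro f₂ cs h1 h2
    cases hcs : cs.contains '/' with
    | false =>
      cases f₂ with
      | zero =>
        have : cs = [] := List.length_eq_zero_iff.mp (Nat.le_zero.mp h2)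
        subst this; simp [pvKeep]
      | succ m => simp only [pvKeep, hcs, Bool.false_eq_true, if_false]
    | true =>
      have hne : cs ≠ [] := by rintro rfl; simp at hcs
      have hlen : 1 ≤ cs.length := List.length_pos_iff.mpr hne
      cases f₂ with
      | zero => omega
      | succ m =>
        have hpl : (pvParentChars cs).length < cs.length := pvParentChars_length_lt cs hcs
        simp only [pvKeep, hcs, if_true]
        rw [ih m (pvParentChars cs) (by omega) (by omega)]

theorem pvMem_dedup_filter (pre : List String) (f : String → Bool) (x : String) :
    x ∈ (PySem.List.dedup pre).filter f ↔ x ∈ pre ∧ f x = true := by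
  simp [List.mem_filter, PySem.List.mem_dedup]

theorem pvDedup_append (pre : List String) (p : String) :
    PySem.List.dedup (pre ++ [p]) =
      if p ∈ pre then PySem.List.dedup pre else PySem.List.dedup pre ++ [p] := by
  have h1 : PySem.List.dedup (pre ++ [p]) = PySem.Set.add (PySem.List.dedup pre) p := by
    simp [PySem.List.dedup, PySem.Set.ofList, List.foldl_append]
  rw [h1]
  unfold PySem.Set.add
  by_cases hp : p ∈ pre
  · rw [if_pos, if_pos hp]
    simp [PySem.Set.contains, List.contains_iff_mem, PySem.List.mem_dedup]
    exact hp
  · rw [if_neg, if_neg hp]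
    simp [PySem.Set.contains, List.contains_iff_mem, PySem.List.mem_dedup]
    exact hp

-- unfolding Source B's keep on a path that has a '/'
theorem pvKeepStr_eq (S : PySem.Set String) (p : String) (h : p.toList.contains '/' = true) :
    pvKeep S p.toList.length p.toList =
      (if PySem.Set.contains S (pvParent p) then
        ! pvKeep S (pvParent p).toList.length (pvParent p).toList
      else true) := by
  have hne : p.toList ≠ [] := by rintro hnil; rw [hnil] at h; simp at h
  have hpar : pvParent p = String.ofList (pvParentChars p.toList) := by
    unfold pvParent; rw [if_pos h]
  obtain ⟨c, t, hct⟩ := List.exists_cons_of_ne_nil hne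
  have hlen : p.toList.length = t.length + 1 := by rw [hct]; simp
  have hpl : (pvParentChars p.toList).length < p.toList.length :=
    pvParentChars_length_lt _ h
  rw [hlen]
  simp only [pvKeep, ← hlen, h, if_true]
  rw [hpar]
  simp only [String.toList_ofList]
  rw [pvKeep_fuel S (t.length) ((pvParentChars p.toList).length) (pvParentChars p.toList)
    (by omega) le_rfl]

-- in a depth-sorted list every strictly shallower member lies in the processed prefix
theorem pvMem_pre (pre r : List String) (p x : String)
    (hs : (pre ++ p :: r).Pairwise (fun a b => pvKey a ≤ pvKey b))
    (hlt : pvKey x < pvKey p) (hx : x ∈ pre ++ p :: r) : x ∈ pre := by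
  rcases List.mem_append.mp hx with hx' | hx'
  · exact hx'
  · exfalso
    have hsuff : (p :: r).Pairwise (fun a b => pvKey a ≤ pvKey b) :=
      List.Pairwise.sublist (List.sublist_append_right pre (p :: r)) hs
    rcases List.mem_cons.mp hx' with rfl | hx''
    · omega
    · have := (List.pairwise_cons.mp hsuff).1 x hx''
      omega

-- the loop invariant: A's fold over the tail computes B's filter of the deduped whole
theorem pvFold_inv (L : List String) (S : PySem.Set String)
    (hS : ∀ x : String, PySem.Set.contains S x = true ↔ x ∈ L)
    (hs : L.Pairwise (fun a b => pvKey a ≤ pvKey b)) :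
    ∀ (rest pre : List String) (acc : List String), L = pre ++ rest →
      acc = (PySem.List.dedup pre).filter (fun p => pvKeep S p.toList.length p.toList) →
      rest.foldl
          (fun acc p =>
            if acc.contains p then acc
            else if acc.contains (pvParent p) then acc
            else acc ++ [p]) acc
        = (PySem.List.dedup (pre ++ rest)).filter (fun p => pvKeep S p.toList.length p.toList) := by
  intro rest
  induction rest with
  | nil => intro pre acc hL hacc; simpa using hacc
  | cons p r ih =>
    intro pre acc hL hacc
    have hL' : L = (pre ++ [p]) ++ r := by rw [hL]; simp
    have hccm : ∀ x : String, acc.contains x = true ↔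
        (x ∈ pre ∧ pvKeep S x.toList.length x.toList = true) := by
      intro x
      rw [List.contains_iff_mem, hacc, pvMem_dedup_filter]
    have hsΛ : (pre ++ p :: r).Pairwise (fun a b => pvKey a ≤ pvKey b) := by rw [← hL]; exact hs
    -- the parent of p, when it exists in L, was already processed
    have hparent_pre : p.toList.contains '/' = true →
        PySem.Set.contains S (pvParent p) = true → pvParent p ∈ pre := by
      intro hsl hcs
      have hmemL : pvParent p ∈ L := (hS _).mp hcs
      have hklt : pvKey (pvParent p) < pvKey p := by
        have h1 : pvParent p = String.ofList (pvParentChars p.toList) := by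
          unfold pvParent; rw [if_pos hsl]
        rw [h1, pvKey_ofList, pvKey_eq_count]
        exact pvParent_key_lt _ hsl
      exact pvMem_pre pre r p _ hsΛ hklt (by rw [← hL]; exact hmemL)
    rw [List.foldl_cons]
    have hstep :
        (if acc.contains p then acc
         else if acc.contains (pvParent p) then acc
         else acc ++ [p])
        = (PySem.List.dedup (pre ++ [p])).filter (fun q => pvKeep S q.toList.length q.toList) := by
      by_cases hm : acc.contains p = true
      · rw [if_pos hm]
        obtain ⟨hppre, hkp⟩ := (hccm p).mp hm
        rw [pvDedup_append, if_pos hppre, ← hacc]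
      · rw [if_neg (by simpa using hm)]
        by_cases hpm : acc.contains (pvParent p) = true
        · -- parent kept earlier: p is dropped by both
          rw [if_pos hpm]
          obtain ⟨hppar, hkpar⟩ := (hccm (pvParent p)).mp hpm
          have hsl : p.toList.contains '/' = true := by
            by_contra hno
            have : pvParent p = p := by unfold pvParent; rw [if_neg (by simpa using hno)]
            rw [this] at hpm
            exact hm hpm
          have hcsS : PySem.Set.contains S (pvParent p) = true := by
            rw [hS]; rw [hL]; exact List.mem_append.mpr (Or.inl hppar)
          have hkp : pvKeep S p.toList.length p.toList = false := by
            rw [pvKeepStr_eq S p hsl, if_pos hcsS, hkpar]; rfl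
          rw [pvDedup_append]
          by_cases hpin : p ∈ pre
          · rw [if_pos hpin, ← hacc]
          · rw [if_neg hpin, List.filter_append, ← hacc]
            simpa using hkp
        · -- neither p nor its parent kept yet: both keep p
          rw [if_neg (by simpa using hpm)]
          have hkp : pvKeep S p.toList.length p.toList = true := by
            by_cases hsl : p.toList.contains '/' = true
            · rw [pvKeepStr_eq S p hsl]
              by_cases hcsS : PySem.Set.contains S (pvParent p) = true
              · rw [if_pos hcsS]
                have hppre : pvParent p ∈ pre := hparent_pre hsl hcsS
                have : pvKeep S (pvParent p).toList.length (pvParent p).toList = false := by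
                  by_contra hkk
                  exact hpm ((hccm (pvParent p)).mpr ⟨hppre, by simpa using hkk⟩)
                rw [this]; rfl
              · rw [if_neg hcsS]
            · -- no '/' in p: keep is true outright
              cases hplen : p.toList with
              | nil => simp [pvKeep]
              | cons c t =>
                have : (c :: t).contains '/' = false := by rw [← hplen]; simpa using hsl
                simp only [List.length_cons, pvKeep, this, Bool.false_eq_true, if_false]
          have hpnotpre : p ∉ pre := by
            intro hpin
            exact hm ((hccm p).mpr ⟨hpin, hkp⟩)
          rw [pvDedup_append, if_neg hpnotpre, List.filter_append, ← hacc]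
          have hkp' : pvKeep S p.length p.toList = true := by simpa using hkp
          simp [hkp']
    rw [ih (pre ++ [p]) _ hL' hstep]
    have : (pre ++ [p]) ++ r = pre ++ p :: r := by simp
    rw [this]

-- ===== VERDICT (by name: the statement is the Claim_ definition above) =====
theorem path_filter_overlap_spec : Claim_equal_path_filter_overlap := by
  intro paths _ _
  unfold Spec_path_filter_overlap path_filter_overlap path_filter_overlap_alt
  simp only [pvNorm_eq]
  set L := PySem.List.sorted (paths.map (fun p => pvRstripSlash p)) (fun p => pvKey p) with hLdef
  have hS : ∀ x : String,
      PySem.Set.contains (PySem.Set.ofList (PySem.List.dedup L)) x = true ↔ x ∈ L := by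
    intro x
    unfold PySem.Set.contains
    rw [List.contains_iff_mem]
    rw [show ((PySem.Set.ofList (PySem.List.dedup L) : PySem.Set String) : List String)
          = PySem.Set.ofList (PySem.List.dedup L) from rfl]
    rw [PySem.Set.mem_ofList, PySem.List.mem_dedup]
  have hs : L.Pairwise (fun a b => pvKey a ≤ pvKey b) := PySem.List.sorted_pairwise _ _
  have hmain := pvFold_inv L (PySem.Set.ofList (PySem.List.dedup L)) hS hs L [] []
    (by simp) (by rfl)
  simpa using hmain
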